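-- pv_equiv track=rewrite | github.com/AlanNggg/fsd-elasticsearch-training-connector | ees_panopto/utils.py | split_list_into_buckets
-- ===== SOURCE A (Python) =====
-- def split_list_into_buckets(documents, total_buckets):
--     """Divide large number of documents amongst the total buckets
--     :param documents: list to be partitioned
--     :param total_buckets: number of buckets to be formed
--     """
--     if documents:
--         groups = min(total_buckets, len(documents))
--         group_list = []
--         for i in range(groups):
--             group_list.append(documents[i::groups])
--         return group_list
--     else:
--         return []
-- ===== SOURCE B (Python) =====
-- def split_list_into_buckets(documents, total_buckets):
--     """Divide large number of documents amongst the total buckets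
--     :param documents: list to be partitioned
--     :param total_buckets: number of buckets to be formed
--     """
--     if not documents:
--         return []
--     groups = min(total_buckets, len(documents))
--     if groups <= 0:
--         return []
--     buckets = [[] for _ in range(groups)]
--     for index, doc in enumerate(documents):
--         buckets[index % groups].append(doc)
--     return buckets
-- ===== Notes on version B (the rewrite author's own statement) =====
-- stated objective: alternative
-- what changed: A loops over the buckets and takes a stride slice documents[i::groups] for each; B makes a single enumerate pass over the elements, dispatching each document to buckets[index % groups].
import Mathlib
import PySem

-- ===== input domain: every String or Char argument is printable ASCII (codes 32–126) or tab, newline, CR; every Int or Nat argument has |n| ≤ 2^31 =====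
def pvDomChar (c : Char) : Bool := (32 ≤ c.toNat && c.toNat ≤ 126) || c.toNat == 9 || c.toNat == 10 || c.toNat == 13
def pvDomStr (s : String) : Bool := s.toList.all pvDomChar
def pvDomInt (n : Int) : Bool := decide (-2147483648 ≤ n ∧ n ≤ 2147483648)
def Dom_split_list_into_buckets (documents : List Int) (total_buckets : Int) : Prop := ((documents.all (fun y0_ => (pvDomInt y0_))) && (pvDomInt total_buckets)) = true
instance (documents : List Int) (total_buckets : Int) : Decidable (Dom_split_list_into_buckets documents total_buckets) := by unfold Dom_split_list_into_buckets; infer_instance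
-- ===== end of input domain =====

-- B replaces A's per-bucket stride slicing by a single pass over the elements that
-- dispatches each document to bucket (index % groups); same return value, one traversal.


-- ===== PORT A =====
-- for i in range(groups): group_list.append(documents[i::groups])
def split_list_into_buckets (documents : List Int) (total_buckets : Int) : List (List Int) :=
  if documents ≠ [] then
    let groups : Int := min total_buckets (documents.length : Int)
    (PySem.List.pyRange 0 groups 1).foldl
      (fun group_list i =>
        group_list ++ [(PySem.List.slice? documents (some i) none groups).getD []]) []
  else []

-- ===== PORT B =====
-- one pass with modular dispatch: buckets[index % groups].append(doc)
def split_list_into_buckets_alt (documents : List Int) (total_buckets : Int) : List (List Int) :=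
  if documents = [] then []
  else
    let groups : Int := min total_buckets (documents.length : Int)
    if groups ≤ 0 then []
    else
      (PySem.List.enumerate documents).foldl
        (fun buckets p =>
          let j := (PySem.Int.mod p.1 groups).toNat
          buckets.set j (buckets.getD j [] ++ [p.2]))
        (List.replicate groups.toNat [])

-- ===== PRECONDITION & SPEC =====
def Spec_split_list_into_buckets (documents : List Int) (total_buckets : Int) (out : List (List Int)) : Prop := out = split_list_into_buckets_alt documents total_buckets
instance (documents : List Int) (total_buckets : Int) (out : List (List Int)) : Decidable (Spec_split_list_into_buckets documents total_buckets out) := by unfold Spec_split_list_into_buckets; infer_instance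

-- ===== CLAIM (what is proved, stated in full; the proofs are below) =====
def Claim_equal_split_list_into_buckets : Prop := ∀ (documents : List Int) (total_buckets : Int), Dom_split_list_into_buckets documents total_buckets → Spec_split_list_into_buckets documents total_buckets (split_list_into_buckets documents total_buckets)

-- ===== LEMMAS AND PROOFS =====

-- elements of xs at positions p with (s + p) % g = r, in order
def selMod (xs : List Int) (r g s : Nat) : List Int :=
  match xs with
  | [] => []
  | x :: t => (if s % g = r then [x] else []) ++ selMod t r g (s + 1)

-- A's stride slice, in the filterMap-over-range form slice? reduces to, equals selMod
lemma stride_filterMap_eq_selMod (g : Nat) (hg : 0 < g) :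
    ∀ (xs : List Int) (r : Nat) (_hr : r < g) (cnt : Nat)
      (_hcnt : xs.length ≤ r + g * cnt) (s : Nat),
      (List.range cnt).filterMap (fun k => xs[r + g * k]?) = selMod xs ((r + s) % g) g s := by
  intro xs
  induction xs with
  | nil =>
      intro r _ cnt _ s
      simp [selMod]
  | cons x t ih =>
      intro r hr cnt hcnt s
      by_cases hr0 : r = 0
      · subst hr0
        obtain ⟨cnt', rfl⟩ : ∃ cnt', cnt = cnt' + 1 := by
          cases cnt with
          | zero => simp at hcnt
          | succ n => exact ⟨n, rfl⟩
        have hms : g * (cnt' + 1) = g * cnt' + g := Nat.mul_succ g cnt'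
        rw [List.range_succ_eq_map]
        have hsel : (0 + s) % g = s % g := by rw [Nat.zero_add]
        rw [hsel]
        simp only [List.filterMap_cons, List.filterMap_map, Nat.mul_zero, Nat.add_zero,
          List.getElem?_cons_zero]
        have htail : ∀ k : Nat, (x :: t)[0 + g * (k + 1)]? = t[(g - 1) + g * k]? := by
          intro k
          have hmk : g * (k + 1) = g * k + g := Nat.mul_succ g k
          have : 0 + g * (k + 1) = ((g - 1) + g * k) + 1 := by omega
          rw [this]
          simp
        have hlen : t.length ≤ (g - 1) + g * cnt' := by
          simp only [List.length_cons] at hcnt; omega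
        have ihr := ih (g - 1) (by omega) cnt' hlen (s + 1)
        have hres : (g - 1 + (s + 1)) % g = s % g := by
          have : g - 1 + (s + 1) = s + g := by omega
          rw [this, Nat.add_mod_right]
        rw [hres] at ihr
        rw [List.filterMap_congr (fun k _ => by simpa using htail k), ihr]
        simp [selMod]
      · have hidx : ∀ k : Nat, (x :: t)[r + g * k]? = t[(r - 1) + g * k]? := by
          intro k
          have : r + g * k = ((r - 1) + g * k) + 1 := by omega
          rw [this]; simp
        have hlen : t.length ≤ (r - 1) + g * cnt := by
          simp only [List.length_cons] at hcnt; omega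
        have ihr := ih (r - 1) (by omega) cnt hlen (s + 1)
        have hres : (r - 1 + (s + 1)) % g = (r + s) % g := by
          have : r - 1 + (s + 1) = r + s := by omega
          rw [this]
        rw [hres] at ihr
        have hne : s % g ≠ (r + s) % g := by
          intro h
          have hme : Nat.ModEq g (r + s) (0 + s) := by
            unfold Nat.ModEq; rw [Nat.zero_add]; exact h.symm
          have : Nat.ModEq g r 0 := Nat.ModEq.add_right_cancel rfl hme
          have : r % g = 0 % g := this
          rw [Nat.zero_mod, Nat.mod_eq_of_lt hr] at this
          exact hr0 this
        rw [List.filterMap_congr (fun k _ => hidx k), ihr]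
        simp [selMod]
        intro h; exact absurd h hne

-- A's bucket i is the stride slice documents[i::groups]
lemma sliceA_eq_selMod (xs : List Int) (g i : Nat) (hg : 0 < g) (hgl : g ≤ xs.length)
    (hi : i < g) :
    (PySem.List.slice? xs (some (i : Int)) none (g : Int)).getD [] = selMod xs i g 0 := by
  have hg' : ¬((g : Int) = 0) := by omega
  have hgneg : ¬((g : Int) < 0) := by omega
  have hineg : ¬((i : Int) < 0) := by omega
  unfold PySem.List.slice? PySem.List.sliceIndices
  rw [if_neg hg']
  simp only [hgneg, if_false, hineg, if_pos (show (0:Int) < g by omega)]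
  rw [min_eq_left (by omega : (i:Int) ≤ xs.length), if_pos (by omega : (i:Int) < xs.length)]
  simp only [Option.getD_some]
  set q : Int := ((xs.length : Int) - i + g - 1) / g with hq
  have hq0 : 0 ≤ q := Int.ediv_nonneg (by omega) (by omega)
  have hdm : (g : Int) * q + ((xs.length : Int) - i + g - 1) % g
      = (xs.length : Int) - i + g - 1 := by
    rw [hq]; exact Int.mul_ediv_add_emod _ _
  have hr0 := Int.emod_nonneg ((xs.length : Int) - i + g - 1) hg'
  have hrlt := Int.emod_lt_of_pos ((xs.length : Int) - i + g - 1) (by omega : (0:Int) < g)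
  have hc : ((g * q.toNat : Nat) : Int) = (g : Int) * q := by
    push_cast [Int.toNat_of_nonneg hq0]; ring
  have hcnt : xs.length ≤ i + g * q.toNat := by omega
  have hfun : ∀ k : Nat, xs[((i:Int) + g * k).toNat]? = xs[i + g * k]? := by
    intro k
    have h : (((i:Int)) + (g:Int)*(k:Int)).toNat = i + g*k := by norm_cast
    rw [h]
  rw [List.filterMap_congr (fun k _ => hfun k)]
  have := stride_filterMap_eq_selMod g hg xs i hi q.toNat hcnt 0
  simpa [Nat.mod_eq_of_lt hi] using this

-- B's fold invariant
lemma bfold_eq (g : Nat) (hg : 0 < g) :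
    ∀ (xs : List Int) (s : Nat) (bs : List (List Int)) (_hb : bs.length = g),
      (PySem.List.enumerate xs (s : Int)).foldl
        (fun buckets p =>
          let j := (PySem.Int.mod p.1 (g : Int)).toNat
          buckets.set j (buckets.getD j [] ++ [p.2])) bs
      = (List.range g).map (fun j => bs.getD j [] ++ selMod xs j g s) := by
  intro xs
  induction xs with
  | nil =>
      intro s bs hb
      simp [PySem.List.enumerate, selMod]
      apply List.ext_getElem
      · simp [hb]
      · intro n h1 h2
        simp [hb] at h1 ⊢
        simp [List.getElem?_eq_getElem (show n < bs.length by omega)]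
  | cons x t ih =>
      intro s bs hb
      rw [PySem.List.enumerate_cons, List.foldl_cons]
      have hcast : ((s : Int) + 1) = ((s + 1 : Nat) : Int) := by push_cast; ring
      rw [hcast]
      set j0 := (PySem.Int.mod (s : Int) (g : Int)).toNat with hj0
      have hj0v : j0 = s % g := by
        rw [hj0, PySem.Int.mod_natCast, Int.toNat_natCast]
      have hj0lt : j0 < g := by rw [hj0v]; exact Nat.mod_lt _ hg
      rw [ih (s + 1) _ (by simp [hb])]
      apply List.map_congr_left
      intro j hj
      simp only [List.mem_range] at hj
      have hset : (bs.set j0 (bs.getD j0 [] ++ [x])).getD j [] =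
          if j0 = j then bs.getD j0 [] ++ [x] else bs.getD j [] := by
        simp [List.getD, List.getElem?_set, hb, hj0lt]
        split_ifs with h
        · simp
        · rfl
      rw [hset]
      by_cases hcase : j0 = j
      · subst hcase
        rw [if_pos rfl]
        have : selMod (x :: t) j0 g s = [x] ++ selMod t j0 g (s + 1) := by
          simp [selMod, hj0v]
        rw [this]; simp
      · rw [if_neg hcase]
        have : selMod (x :: t) j g s = selMod t j g (s + 1) := by
          simp [selMod]
          intro h; exfalso; exact hcase (by omega)
        rw [this]

-- ===== VERDICT (by name: the statement is the Claim_ definition above) =====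
theorem split_list_into_buckets_spec : Claim_equal_split_list_into_buckets := by
  intro documents total_buckets _hdom
  unfold Spec_split_list_into_buckets split_list_into_buckets split_list_into_buckets_alt
  by_cases hnil : documents = []
  · simp [hnil]
  · rw [if_pos hnil, if_neg hnil]
    simp only []
    set G : Int := min total_buckets (documents.length : Int) with hG
    by_cases hpos : G ≤ 0
    · rw [if_pos hpos, PySem.List.pyRange_one_eq_nil hpos]
      simp
    · rw [if_neg hpos]
      push Not at hpos
      set g : Nat := G.toNat with hg
      have hGg : (g : Int) = G := Int.toNat_of_nonneg (by omega)
      have hg0 : 0 < g := by omega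
      have hgl : g ≤ documents.length := by
        have : G ≤ (documents.length : Int) := min_le_right _ _
        omega
      rw [← hGg, PySem.List.pyRange_zero_nat g,
        PySem.List.foldl_append_singleton_eq_map, List.nil_append, List.map_map]
      have hB := bfold_eq g hg0 documents 0 (List.replicate g []) (by simp)
      rw [show ((0:Nat) : Int) = (0 : Int) from rfl] at hB
      rw [hB]
      apply List.map_congr_left
      intro i hi
      simp only [List.mem_range] at hi
      have hrep : (List.replicate g ([] : List Int)).getD i [] = [] := by simp
      rw [Function.comp_apply, sliceA_eq_selMod documents g i hg0 hgl hi, hrep,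
        List.nil_append]
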